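-- pv_equiv track=rewrite | github.com/relinee/TinkoffAlgoCourseTasks | Tasks 6 (DP)/task_b.py | count_safe_options
-- ===== SOURCE A (Python) =====
-- def count_safe_options(n):
--     d1 = [1]*n
--     d2 = [1]*n
--     d3 = [1]*n
--     for i in range(1,n):
--         d1[i] = d2[i - 1] + d3[i - 1]
--         d2[i] = d1[i - 1] + d2[i - 1] + d3[i - 1]
--         d3[i] = d1[i - 1] + d2[i - 1] + d3[i - 1]
--     return d1[n-1]+d2[n-1]+d3[n-1]
-- ===== SOURCE B (Python) =====
-- def count_safe_options(n):
--     # total T(k) over the three DP states satisfies T(k) = 2*T(k-1) + 2*T(k-2),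
--     # T(0) = 1, T(1) = 3; compute (T(n), T(n-1)) by fast exponentiation of the
--     # 2x2 companion matrix [[2, 2], [1, 0]]: answer = T(n) = 3*u + v where
--     # [[u, v], [_, _]] = M^(n-1).
--     def mul(x, y):
--         x00, x01, x10, x11 = x
--         y00, y01, y10, y11 = y
--         return (x00 * y00 + x01 * y10, x00 * y01 + x01 * y11,
--                 x10 * y00 + x11 * y10, x10 * y01 + x11 * y11)
--     result = (1, 0, 0, 1)
--     base = (2, 2, 1, 0)
--     k = n - 1
--     while k > 0:
--         if k & 1:
--             result = mul(result, base)
--         base = mul(base, base)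
--         k >>= 1
--     return 3 * result[0] + result[1]
-- ===== Notes on version B (the rewrite author's own statement) =====
-- stated objective: faster
-- what changed: Replaced the O(n) three-array linear DP by fast binary exponentiation of the 2x2 companion matrix of the total-count recurrence T(k)=2T(k-1)+2T(k-2), so only O(log n) matrix multiplications are performed.
-- outside the precondition, e.g. on count_safe_options(0): A raises IndexError, B returns 3
import Mathlib
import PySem

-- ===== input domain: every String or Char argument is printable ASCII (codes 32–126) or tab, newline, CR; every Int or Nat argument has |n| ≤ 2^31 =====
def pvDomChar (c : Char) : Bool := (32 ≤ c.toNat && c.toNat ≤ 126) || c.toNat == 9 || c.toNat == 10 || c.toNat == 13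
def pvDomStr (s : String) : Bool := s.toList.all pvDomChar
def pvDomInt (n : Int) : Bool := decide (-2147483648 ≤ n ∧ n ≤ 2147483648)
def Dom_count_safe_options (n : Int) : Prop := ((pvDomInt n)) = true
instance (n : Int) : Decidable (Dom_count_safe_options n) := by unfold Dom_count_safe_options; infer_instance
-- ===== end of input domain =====

-- B replaces A's O(n) three-array DP by binary exponentiation of the 2x2 companion
-- matrix of the total-count recurrence (objective: faster, asymptotically).

-- ===== PORT A =====
-- one iteration of A's loop body (statement order preserved: d2/d3 read the already-updated d1/d2)
def pvAStep (s : List Int × List Int × List Int) (i : Int) : List Int × List Int × List Int :=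
  let d1 := s.1
  let d2 := s.2.1
  let d3 := s.2.2
  let d1' := PySem.List.pySetD d1 i (PySem.List.pyGetD d2 (i - 1) 0 + PySem.List.pyGetD d3 (i - 1) 0)
  let d2' := PySem.List.pySetD d2 i (PySem.List.pyGetD d1' (i - 1) 0 + PySem.List.pyGetD d2 (i - 1) 0 + PySem.List.pyGetD d3 (i - 1) 0)
  let d3' := PySem.List.pySetD d3 i (PySem.List.pyGetD d1' (i - 1) 0 + PySem.List.pyGetD d2' (i - 1) 0 + PySem.List.pyGetD d3 (i - 1) 0)
  (d1', d2', d3')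

def count_safe_options (n : Int) : Int :=
  let d1 := List.replicate n.toNat (1 : Int)
  let d2 := List.replicate n.toNat (1 : Int)
  let d3 := List.replicate n.toNat (1 : Int)
  let s := (PySem.List.pyRange 1 n 1).foldl pvAStep (d1, d2, d3)
  PySem.List.pyGetD s.1 (n - 1) 0 + PySem.List.pyGetD s.2.1 (n - 1) 0 + PySem.List.pyGetD s.2.2 (n - 1) 0

-- ===== PORT B =====
-- 2x2 integer matrix as (m00, m01, m10, m11)
def pvMul (x y : Int × Int × Int × Int) : Int × Int × Int × Int :=
  (x.1 * y.1 + x.2.1 * y.2.2.1, x.1 * y.2.1 + x.2.1 * y.2.2.2,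
   x.2.2.1 * y.1 + x.2.2.2 * y.2.2.1, x.2.2.1 * y.2.1 + x.2.2.2 * y.2.2.2)

-- the 'while k > 0' binary-exponentiation loop of Source B
def pvPowLoop (result base : Int × Int × Int × Int) (k : Nat) : Int × Int × Int × Int :=
  if h : k = 0 then result
  else pvPowLoop (if k % 2 = 1 then pvMul result base else result) (pvMul base base) (k / 2)
termination_by k
decreasing_by exact Nat.div_lt_self (Nat.pos_of_ne_zero h) (by omega)

def count_safe_options_alt (n : Int) : Int :=
  let r := pvPowLoop (1, 0, 0, 1) (2, 2, 1, 0) (n - 1).toNat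
  3 * r.1 + r.2.1

-- ===== PRECONDITION & SPEC =====
-- Pre_ excludes exactly n ≤ 0, where A raises IndexError (d1[n-1] on an empty list).
def Pre_count_safe_options (n : Int) : Prop := 1 ≤ n
instance (n : Int) : Decidable (Pre_count_safe_options n) := by unfold Pre_count_safe_options; infer_instance
def pvWitness_count_safe_options : Int := 5

def Spec_count_safe_options (n : Int) (out : Int) : Prop := out = count_safe_options_alt n
instance (n : Int) (out : Int) : Decidable (Spec_count_safe_options n out) := by unfold Spec_count_safe_options; infer_instance

-- ===== CLAIM (what is proved, stated in full; the proofs are below) =====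
def Claim_equal_count_safe_options : Prop := ∀ (n : Int), Dom_count_safe_options n → Pre_count_safe_options n → Spec_count_safe_options n (count_safe_options n)

-- ===== LEMMAS AND PROOFS =====

-- reference sequences: pvA k = (d1[k], d2[k]) of A's DP (d3 = d2 throughout)
def pvA : Nat → Int × Int
  | 0 => (1, 1)
  | k + 1 => (2 * (pvA k).2, (pvA k).1 + 2 * (pvA k).2)

-- reference matrix power: pvM k = M^k, M = (2,2,1,0)
def pvM : Nat → Int × Int × Int × Int
  | 0 => (1, 0, 0, 1)
  | k + 1 => pvMul (pvM k) (2, 2, 1, 0)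

theorem pvMul_assoc (a b c : Int × Int × Int × Int) :
    pvMul (pvMul a b) c = pvMul a (pvMul b c) := by
  obtain ⟨a0, a1, a2, a3⟩ := a; obtain ⟨b0, b1, b2, b3⟩ := b; obtain ⟨c0, c1, c2, c3⟩ := c
  simp only [pvMul, Prod.mk.injEq]
  refine ⟨by ring, by ring, by ring, by ring⟩

theorem pvMul_one (a : Int × Int × Int × Int) : pvMul a (1, 0, 0, 1) = a := by
  obtain ⟨a0, a1, a2, a3⟩ := a
  simp only [pvMul, Prod.mk.injEq]
  refine ⟨by ring, by ring, by ring, by ring⟩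

theorem pvMul_one_left (a : Int × Int × Int × Int) : pvMul (1, 0, 0, 1) a = a := by
  obtain ⟨a0, a1, a2, a3⟩ := a
  simp only [pvMul, Prod.mk.injEq]
  refine ⟨by ring, by ring, by ring, by ring⟩

theorem pvM_add (j k : Nat) : pvMul (pvM j) (pvM k) = pvM (j + k) := by
  induction k with
  | zero => simp [pvM, pvMul_one]
  | succ k ih =>
    show pvMul (pvM j) (pvMul (pvM k) (2,2,1,0)) = pvM (j + k + 1)
    rw [← pvMul_assoc, ih]; rfl

theorem pvPowLoop_eq (k : Nat) : ∀ (r : Int × Int × Int × Int) (e : Nat),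
    pvPowLoop r (pvM e) k = pvMul r (pvM (e * k)) := by
  induction k using Nat.strong_induction_on with
  | _ k ih =>
    intro r e
    by_cases h : k = 0
    · subst h; rw [pvPowLoop]; simp [pvM, pvMul_one]
    · rw [pvPowLoop]
      simp only [h, dite_false]
      have hbb : pvMul (pvM e) (pvM e) = pvM (e + e) := pvM_add e e
      have hlt : k / 2 < k := Nat.div_lt_self (Nat.pos_of_ne_zero h) (by omega)
      by_cases hp : k % 2 = 1
      · simp only [hp, if_true]
        rw [hbb, ih (k / 2) hlt (pvMul r (pvM e)) (e + e), pvMul_assoc, pvM_add]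
        have : e + (e + e) * (k / 2) = e * k := by
          have hk : k = 2 * (k / 2) + 1 := by omega
          calc e + (e + e) * (k / 2) = e * (2 * (k / 2) + 1) := by ring
          _ = e * k := by rw [← hk]
        rw [this]
      · simp only [hp, if_false]
        rw [hbb, ih (k / 2) hlt r (e + e)]
        have : (e + e) * (k / 2) = e * k := by
          have hk : k = 2 * (k / 2) := by omega
          calc (e + e) * (k / 2) = e * (2 * (k / 2)) := by ring
          _ = e * k := by rw [← hk]
        rw [this]

theorem pvM_one : pvM 1 = (2, 2, 1, 0) := by
  show pvMul (1,0,0,1) (2,2,1,0) = (2,2,1,0)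
  exact pvMul_one_left _

-- bridge: B's answer components equal A's DP totals
theorem pvM_pvA (k : Nat) :
    (pvM k).1 = (pvA k).1 ∧ 2 * (pvA k).2 = 2 * (pvM k).1 + (pvM k).2.1 := by
  induction k with
  | zero => simp [pvM, pvA]
  | succ k ih =>
    obtain ⟨h1, h2⟩ := ih
    constructor
    · show (pvMul (pvM k) (2,2,1,0)).1 = 2 * (pvA k).2
      simp only [pvMul]
      omega
    · show 2 * ((pvA k).1 + 2 * (pvA k).2) =
        2 * (pvMul (pvM k) (2,2,1,0)).1 + (pvMul (pvM k) (2,2,1,0)).2.1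
      simp only [pvMul]
      omega

theorem alt_eq_pvA (n : Int) :
    count_safe_options_alt n = (pvA (n - 1).toNat).1 + 2 * (pvA (n - 1).toNat).2 := by
  unfold count_safe_options_alt
  have h1 : pvPowLoop (1,0,0,1) (2,2,1,0) (n-1).toNat = pvM (n-1).toNat := by
    rw [← pvM_one, pvPowLoop_eq, pvMul_one_left, one_mul]
  simp only [h1]
  obtain ⟨ha, hb⟩ := pvM_pvA (n - 1).toNat
  omega

-- ---- A side ----

-- state after folding over range(1, m+1): lengths preserved and entry m holds the DP values
theorem foldl_inv (n : Int) (hn : 1 ≤ n) (m : Nat) (hm : (m : Int) < n) :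
    let s := (PySem.List.pyRange 1 ((m : Int) + 1) 1).foldl pvAStep
      (List.replicate n.toNat 1, List.replicate n.toNat 1, List.replicate n.toNat 1)
    s.1.length = n.toNat ∧ s.2.1.length = n.toNat ∧ s.2.2.length = n.toNat ∧
    PySem.List.pyGetD s.1 (m : Int) 0 = (pvA m).1 ∧
    PySem.List.pyGetD s.2.1 (m : Int) 0 = (pvA m).2 ∧
    PySem.List.pyGetD s.2.2 (m : Int) 0 = (pvA m).2 := by
  induction m with
  | zero =>
    have h0 : PySem.List.pyRange 1 (0 + 1 : Int) 1 = [] :=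
      PySem.List.pyRange_one_eq_nil (by omega)
    have hlen : 0 < n.toNat := by omega
    simp [pvA, PySem.List.pyGetD_zero, List.getD, hlen]
  | succ m ih =>
    have hm' : (m : Int) < n := by push_cast; push_cast at hm; omega
    have ih' := ih hm'
    have hsplit : PySem.List.pyRange 1 ((m : Int) + 1 + 1) 1 =
        PySem.List.pyRange 1 ((m : Int) + 1) 1 ++ [(m : Int) + 1] :=
      PySem.List.pyRange_one_succ_right (by omega)
    intro s
    have hs : s = pvAStep ((PySem.List.pyRange 1 ((m : Int) + 1) 1).foldl pvAStep
        (List.replicate n.toNat 1, List.replicate n.toNat 1, List.replicate n.toNat 1))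
        ((m : Int) + 1) := by
      show (PySem.List.pyRange 1 ((m : Int) + 1 + 1) 1).foldl pvAStep _ = _
      rw [hsplit, List.foldl_append]; rfl
    set t := (PySem.List.pyRange 1 ((m : Int) + 1) 1).foldl pvAStep
      (List.replicate n.toNat 1, List.replicate n.toNat 1, List.replicate n.toNat 1) with ht
    obtain ⟨hl1, hl2, hl3, hg1, hg2, hg3⟩ := ih'
    have hmn : m + 1 < n.toNat := by push_cast at hm; omega
    have hcast : ((m : Int) + 1) = ((m + 1 : Nat) : Int) := by push_cast; ring
    have hprev : ((m : Int) + 1 - 1) = (m : Int) := by ring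
    -- indices as Nats
    have set1 : PySem.List.pySetD t.1 ((m:Int)+1) = fun v => t.1.set (m+1) v := by
      funext v; rw [hcast, PySem.List.pySetD_natCast]
    have set2 : PySem.List.pySetD t.2.1 ((m:Int)+1) = fun v => t.2.1.set (m+1) v := by
      funext v; rw [hcast, PySem.List.pySetD_natCast]
    have set3 : PySem.List.pySetD t.2.2 ((m:Int)+1) = fun v => t.2.2.set (m+1) v := by
      funext v; rw [hcast, PySem.List.pySetD_natCast]
    -- reading index m from a list set at m+1 is unchanged
    have read1 : ∀ v, PySem.List.pyGetD (t.1.set (m+1) v) (m : Int) 0 =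
        PySem.List.pyGetD t.1 (m : Int) 0 := by
      intro v
      simp [PySem.List.pyGetD_natCast, List.getD, List.getElem?_set_ne (by omega : m + 1 ≠ m)]
    have read2 : ∀ v, PySem.List.pyGetD (t.2.1.set (m+1) v) (m : Int) 0 =
        PySem.List.pyGetD t.2.1 (m : Int) 0 := by
      intro v
      simp [PySem.List.pyGetD_natCast, List.getD, List.getElem?_set_ne (by omega : m + 1 ≠ m)]
    -- reading the freshly written index m+1
    have readself : ∀ (l : List Int) v, l.length = n.toNat →
        PySem.List.pyGetD (l.set (m+1) v) (((m + 1 : Nat)) : Int) 0 = v := by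
      intro l v hl
      rw [PySem.List.pyGetD_natCast]
      simp [List.getD, hl, hmn]
    rw [hs]
    simp only [pvAStep, set1, set2, set3, hprev]
    refine ⟨by simp [hl1], by simp [hl2], by simp [hl3], ?_, ?_, ?_⟩
    · rw [readself _ _ hl1, hg2, hg3]; simp [pvA]; ring
    · rw [readself _ _ hl2, read1, hg1, hg2, hg3]; simp [pvA]; ring
    · rw [readself _ _ hl3, read1, read2, hg1, hg2, hg3]; simp [pvA]; ring

theorem a_eq_pvA (n : Int) (hn : 1 ≤ n) :
    count_safe_options n = (pvA (n - 1).toNat).1 + 2 * (pvA (n - 1).toNat).2 := by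
  obtain ⟨k, hk⟩ : ∃ k : Nat, n = (k : Int) + 1 := ⟨(n - 1).toNat, by omega⟩
  subst hk
  unfold count_safe_options
  have hinv := foldl_inv ((k : Int) + 1) (by omega) k (by exact_mod_cast lt_add_one (k:Int))
  obtain ⟨_, _, _, h1, h2, h3⟩ := hinv
  have hidx : (k : Int) + 1 - 1 = (k : Int) := by ring
  simp only [hidx, h1, h2, h3]
  simp only [Int.toNat_natCast]
  ring

-- ===== VERDICT (by name: the statement is the Claim_ definition above) =====
theorem count_safe_options_spec : Claim_equal_count_safe_options := by
  intro n _ hpre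
  unfold Spec_count_safe_options
  rw [a_eq_pvA n hpre, alt_eq_pvA n]
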